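-- pv_equiv track=rewrite | github.com/mug31416/E-sports-on-Twitch | chat_analysis/utils.py | get_thresholds_from_followers
-- ===== SOURCE A (Python) =====
-- import copy
--
-- def get_thresholds_from_followers(followers, num_class=10, mode='uniform'):
--     followers_copy = copy.copy(followers)
--     followers_copy.sort()
--     thresholds = []
--     if mode == 'uniform':
--         interval = len(followers_copy) // num_class
--         for i in range(num_class):
--             thresholds.append(followers_copy[min(int((i + 1) * interval), len(followers_copy) - 1)])
--     return thresholds
-- ===== SOURCE B (Python) =====
-- def _select(xs, r):
--     # r-th smallest element of xs (0-based), quickselect with 3-way partition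
--     p = xs[0]
--     lt = [x for x in xs if x < p]
--     if r < len(lt):
--         return _select(lt, r)
--     eq = sum(1 for x in xs if x == p)
--     if r < len(lt) + eq:
--         return p
--     return _select([x for x in xs if x > p], r - len(lt) - eq)
--
-- def get_thresholds_from_followers(followers, num_class=10, mode='uniform'):
--     if mode != 'uniform':
--         return []
--     n = len(followers)
--     q = n // num_class
--     return [_select(followers, min((i + 1) * q, n - 1)) for i in range(num_class)]
-- ===== Notes on version B (the rewrite author's own statement) =====
-- stated objective: alternative
-- what changed: B replaces the copy+full-sort with a quickselect (3-way partition on the head) evaluated at each of the num_class clamped rank positions, so no sorted copy of the list is ever built.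
-- outside the precondition, e.g. on get_thresholds_from_followers([], 3, 'uniform'): A raises IndexError, B raises IndexError; on get_thresholds_from_followers([1, 2], 0, 'uniform'): A raises ZeroDivisionError, B raises ZeroDivisionError
import Mathlib
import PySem

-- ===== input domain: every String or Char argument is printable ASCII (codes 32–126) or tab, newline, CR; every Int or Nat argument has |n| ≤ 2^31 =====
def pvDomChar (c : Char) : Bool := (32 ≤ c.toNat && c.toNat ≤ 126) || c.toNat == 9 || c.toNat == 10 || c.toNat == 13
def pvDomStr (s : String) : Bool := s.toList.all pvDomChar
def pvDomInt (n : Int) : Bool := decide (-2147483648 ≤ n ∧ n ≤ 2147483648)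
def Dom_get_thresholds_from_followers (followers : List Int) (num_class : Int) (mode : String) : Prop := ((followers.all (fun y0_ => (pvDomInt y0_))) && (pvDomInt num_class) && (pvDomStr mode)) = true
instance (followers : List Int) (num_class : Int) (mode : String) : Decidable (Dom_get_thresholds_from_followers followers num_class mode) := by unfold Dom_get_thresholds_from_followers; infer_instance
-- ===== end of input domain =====

-- B replaces the full sort with per-rank quickselect (3-way partition); alternative algorithm, same results.


-- ===== PORT A =====
def get_thresholds_from_followers (followers : List Int) (num_class : Int) (mode : String) : List Int :=
  let followers_copy := PySem.List.sorted followers (fun x => x) false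
  if mode = "uniform" then
    let interval := PySem.Int.floordiv (followers_copy.length : Int) num_class
    (PySem.List.pyRange 0 num_class 1).foldl
      (fun thresholds i =>
        thresholds ++ [PySem.List.pyGetD followers_copy
          (min ((i + 1) * interval) ((followers_copy.length : Int) - 1)) 0]) []
  else []

-- ===== PORT B =====
-- quickselect: r-th smallest (0-based) of a nonempty list, 3-way partition on the head
def selectRank : List Int → Int → Int
  | [], _ => 0   -- unreachable under Pre_ (Python B raises IndexError here)
  | p :: t, r =>
    let lt := (p :: t).filter (fun x => x < p)
    if r < (lt.length : Int) then selectRank lt r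
    else
      let eq : Int := (p :: t).countP (fun x => x == p)
      if r < (lt.length : Int) + eq then p
      else selectRank ((p :: t).filter (fun x => p < x)) (r - lt.length - eq)
termination_by xs _ => xs.length
decreasing_by
  · simp [List.filter]
    exact List.length_filter_le _ _
  · simp [List.filter]
    exact List.length_filter_le _ _

def get_thresholds_from_followers_alt (followers : List Int) (num_class : Int) (mode : String) : List Int :=
  if mode ≠ "uniform" then []
  else
    let n : Int := followers.length
    let q := PySem.Int.floordiv n num_class
    (PySem.List.pyRange 0 num_class 1).map
      (fun i => selectRank followers (min ((i + 1) * q) (n - 1)))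

-- ===== PRECONDITION & SPEC =====
-- Pre_ excludes exactly the inputs where Python A raises (and B raises too):
-- mode 'uniform' with num_class = 0 (ZeroDivisionError) or with an empty list and
-- num_class > 0 (IndexError from followers_copy[-1]).
def Pre_get_thresholds_from_followers (followers : List Int) (num_class : Int) (mode : String) : Prop :=
  mode = "uniform" → (num_class ≠ 0 ∧ (followers ≠ [] ∨ num_class < 0))
instance (followers : List Int) (num_class : Int) (mode : String) : Decidable (Pre_get_thresholds_from_followers followers num_class mode) := by unfold Pre_get_thresholds_from_followers; infer_instance

def pvWitness_get_thresholds_from_followers : List Int × Int × String := ([5, 1, 3, 2], 2, "uniform")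

def Spec_get_thresholds_from_followers (followers : List Int) (num_class : Int) (mode : String) (out : List Int) : Prop := out = get_thresholds_from_followers_alt followers num_class mode
instance (followers : List Int) (num_class : Int) (mode : String) (out : List Int) : Decidable (Spec_get_thresholds_from_followers followers num_class mode out) := by unfold Spec_get_thresholds_from_followers; infer_instance

-- ===== CLAIM (what is proved, stated in full; the proofs are below) =====
def Claim_equal_get_thresholds_from_followers : Prop := ∀ (followers : List Int) (num_class : Int) (mode : String), Dom_get_thresholds_from_followers followers num_class mode → Pre_get_thresholds_from_followers followers num_class mode → Spec_get_thresholds_from_followers followers num_class mode (get_thresholds_from_followers followers num_class mode)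

-- ===== LEMMAS AND PROOFS =====

theorem sorted_partition (xs : List Int) (p : Int) :
    PySem.List.sorted xs (fun x => x) false =
      PySem.List.sorted (xs.filter (fun x => x < p)) (fun x => x) false
      ++ List.replicate (xs.countP (fun x => x == p)) p
      ++ PySem.List.sorted (xs.filter (fun x => p < x)) (fun x => x) false := by
  apply PySem.List.sorted_id_eq_of_perm_of_pairwise
  · -- permutation, via counts
    rw [List.perm_iff_count]
    intro a
    have h1 := (PySem.List.sorted_perm (xs.filter (fun x => x < p)) (fun x => x) false).count_eq a
    have h2 := (PySem.List.sorted_perm (xs.filter (fun x => p < x)) (fun x => x) false).count_eq a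
    simp only [List.count_append, h1, h2, List.count_replicate]
    rcases lt_trichotomy a p with h | h | h
    · have cl : (xs.filter (fun x => x < p)).count a = xs.count a := by
        apply List.count_filter; simpa using h
      have cg : (xs.filter (fun x => p < x)).count a = 0 := by
        apply List.count_eq_zero_of_not_mem
        intro hm; have := (List.mem_filter.mp hm).2; simp at this; omega
      have hne : ¬ (p = a) := by omega
      simp [cl, cg, hne]
    · subst h
      have cl : (xs.filter (fun x => x < a)).count a = 0 := by
        apply List.count_eq_zero_of_not_mem
        intro hm; have := (List.mem_filter.mp hm).2; simp at this
      have cg : (xs.filter (fun x => a < x)).count a = 0 := by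
        apply List.count_eq_zero_of_not_mem
        intro hm; have := (List.mem_filter.mp hm).2; simp at this
      have ce : xs.countP (fun x => x == a) = xs.count a := rfl
      simp [cl, cg, ce]
    · have cl : (xs.filter (fun x => x < p)).count a = 0 := by
        apply List.count_eq_zero_of_not_mem
        intro hm; have := (List.mem_filter.mp hm).2; simp at this; omega
      have cg : (xs.filter (fun x => p < x)).count a = xs.count a := by
        apply List.count_filter; simpa using h
      have hne : ¬ (p = a) := by omega
      simp [cl, cg, hne]
  · -- pairwise ≤
    have plt := PySem.List.sorted_pairwise (xs.filter (fun x => x < p)) (fun x => x)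
    have pgt := PySem.List.sorted_pairwise (xs.filter (fun x => p < x)) (fun x => x)
    have mlt : ∀ a ∈ PySem.List.sorted (xs.filter (fun x => x < p)) (fun x => x) false, a < p := by
      intro a ha
      have := (List.mem_filter.mp ((PySem.List.mem_sorted _ _ _ _).mp ha)).2
      simpa using this
    have mgt : ∀ a ∈ PySem.List.sorted (xs.filter (fun x => p < x)) (fun x => x) false, p < a := by
      intro a ha
      have := (List.mem_filter.mp ((PySem.List.mem_sorted _ _ _ _).mp ha)).2
      simpa using this
    rw [List.append_assoc, List.pairwise_append]
    refine ⟨plt, ?_, ?_⟩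
    · rw [List.pairwise_append]
      refine ⟨List.pairwise_replicate.mpr (Or.inr le_rfl), pgt, ?_⟩
      intro a ha b hb
      have := List.eq_of_mem_replicate ha
      have := mgt b hb
      omega
    · intro a ha b hb
      have hap := mlt a ha
      rcases List.mem_append.mp hb with hb | hb
      · have := List.eq_of_mem_replicate hb; omega
      · have := mgt b hb; omega

theorem selectRank_eq_aux (n : Nat) : ∀ (xs : List Int) (r : Int), xs.length ≤ n → xs ≠ [] →
    0 ≤ r → r < (xs.length : Int) →
    selectRank xs r = (PySem.List.sorted xs (fun x => x) false).getD r.toNat 0 := by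
  induction n with
  | zero => intro xs r hn hx; simp at hn; exact absurd hn (by simpa using hx)
  | succ n ih =>
    intro xs r hn hx h0 hr
    match xs, hx with
    | p :: t, _ =>
      have hpart := sorted_partition (p :: t) p
      have hLt : ((p :: t).filter (fun x => x < p)).length ≤ t.length := by
        simp [List.filter]; exact List.length_filter_le _ _
      have hGt : ((p :: t).filter (fun x => p < x)).length ≤ t.length := by
        simp [List.filter]; exact List.length_filter_le _ _
      have hlenS : (PySem.List.sorted (p :: t) (fun x => x) false).length = (p :: t).length :=
        (PySem.List.sorted_perm _ _ _).length_eq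
      have hlenL : (PySem.List.sorted ((p :: t).filter (fun x => x < p)) (fun x => x) false).length
          = ((p :: t).filter (fun x => x < p)).length := (PySem.List.sorted_perm _ _ _).length_eq
      have hlenG : (PySem.List.sorted ((p :: t).filter (fun x => p < x)) (fun x => x) false).length
          = ((p :: t).filter (fun x => p < x)).length := (PySem.List.sorted_perm _ _ _).length_eq
      have hsum : ((p :: t).filter (fun x => x < p)).length
          + (p :: t).countP (fun x => x == p)
          + ((p :: t).filter (fun x => p < x)).length = (p :: t).length := by
        have := congrArg List.length hpart
        simp only [List.length_append, List.length_replicate, hlenS, hlenL, hlenG] at this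
        omega
      simp only [List.length_cons] at hn hr hsum
      rw [selectRank]
      simp only []
      split_ifs with h1 h2
      · -- r < |L| : recurse on lt
        have hL0 : 0 < ((p :: t).filter (fun x => x < p)).length := by omega
        rw [ih _ r (by omega) (List.ne_nil_of_length_pos hL0) h0 (by exact_mod_cast h1)]
        rw [hpart, List.append_assoc, List.getD_append _ _ _ _ (by omega)]
      · -- the pivot
        rw [hpart, List.append_assoc, List.getD_append_right _ _ _ _ (by omega)]
        rw [List.getD_append (List.replicate ((p :: t).countP (fun x => x == p)) p)
            _ 0 _ (by simp only [List.length_replicate]; omega)]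
        exact (List.getD_replicate p (by omega)).symm
      · -- recurse on gt
        push Not at h1 h2
        have hG0 : 0 < ((p :: t).filter (fun x => p < x)).length := by omega
        rw [ih _ _ (by omega) (List.ne_nil_of_length_pos hG0) (by omega)
            (by exact_mod_cast (by omega : r - ((p :: t).filter (fun x => x < p)).length
              - (p :: t).countP (fun x => x == p) < (((p :: t).filter (fun x => p < x)).length : Int)))]
        rw [hpart, List.append_assoc, List.getD_append_right _ _ _ _ (by omega)]
        rw [List.getD_append_right (List.replicate ((p :: t).countP (fun x => x == p)) p)
            (PySem.List.sorted ((p :: t).filter (fun x => p < x)) (fun x => x) false) 0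
            (r.toNat - (PySem.List.sorted ((p :: t).filter (fun x => x < p)) (fun x => x) false).length)
            (by simp only [List.length_replicate]; omega)]
        congr 1
        simp only [List.length_replicate]
        omega


-- ===== VERDICT (by name: the statement is the Claim_ definition above) =====
theorem get_thresholds_from_followers_spec : Claim_equal_get_thresholds_from_followers := by
  unfold Claim_equal_get_thresholds_from_followers Spec_get_thresholds_from_followers
  intro f k m hdom hpre
  unfold get_thresholds_from_followers get_thresholds_from_followers_alt
  by_cases hm : m = "uniform"
  · simp only [hm, ne_eq, not_true_eq_false, if_false]
    rcases hpre hm with ⟨hk0, hcase⟩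
    by_cases hkpos : 0 < k
    · have hf : f ≠ [] := by
        rcases hcase with h | h
        · exact h
        · omega
      have hfl : 0 < f.length := List.length_pos_iff.mpr hf
      rw [PySem.List.foldl_append_singleton_eq_map, List.nil_append]
      apply List.map_congr_left
      intro i hi
      obtain ⟨hi0, hik⟩ := (PySem.List.mem_pyRange_one).mp hi
      have hS : (PySem.List.sorted f (fun x => x) false).length = f.length :=
        (PySem.List.sorted_perm _ _ _).length_eq
      rw [hS]
      have hq : 0 ≤ PySem.Int.floordiv (f.length : Int) k := by
        rw [PySem.Int.floordiv_eq_ediv_of_pos hkpos]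
        exact Int.ediv_nonneg (by omega) (by omega)
      have h0idx : 0 ≤ min ((i + 1) * PySem.Int.floordiv (f.length : Int) k) ((f.length : Int) - 1) := by
        have : 0 ≤ (i + 1) * PySem.Int.floordiv (f.length : Int) k :=
          mul_nonneg (by omega) hq
        omega
      have hidx : min ((i + 1) * PySem.Int.floordiv (f.length : Int) k) ((f.length : Int) - 1)
          < (f.length : Int) := by omega
      rw [PySem.List.pyGetD_eq_getElem _ _ h0idx (by omega)]
      rw [selectRank_eq_aux f.length f _ le_rfl hf h0idx hidx]
      exact (List.getD_eq_getElem _ 0 (by omega)).symm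
    · have hk : k ≤ 0 := by omega
      rw [PySem.List.pyRange_one_eq_nil hk]
      simp
  · simp [hm]
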